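-- pv_equiv track=rewrite | github.com/nrhawkins/qnano | src/python/qnano/codility/max_counters.py | solution
-- ===== SOURCE A (Python) =====
-- def solution(N, A):
--
--     counters = [0] * N
--     current_max = 0
--     last_max = 0
--
--     for a in A:
--         if a != N+1:
--             counters[a-1] = max(counters[a-1], last_max)
--             counters[a-1] += 1
--             current_max = max(current_max, counters[a-1])
--         else:
--             last_max = current_max
--
--     for i in range(N):
--         counters[i] = max(counters[i], last_max)
--
--     return counters
-- ===== SOURCE B (Python) =====
-- def solution(N, A):
--     counters = [0] * N
--     current_max = 0
--     for a in A:
--         if a != N + 1: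
--             counters[a - 1] += 1
--             if counters[a - 1] > current_max:
--                 current_max = counters[a - 1]
--         else:
--             counters = [current_max] * N
--     return counters
-- ===== Notes on version B (the rewrite author's own statement) =====
-- stated objective: simpler
-- what changed: Replaces the lazy last_max deferral plus final max-sweep with an eager version that rebuilds the whole counter list to [current_max]*N at each max-all operation and returns counters directly with no final pass.
import Mathlib
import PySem

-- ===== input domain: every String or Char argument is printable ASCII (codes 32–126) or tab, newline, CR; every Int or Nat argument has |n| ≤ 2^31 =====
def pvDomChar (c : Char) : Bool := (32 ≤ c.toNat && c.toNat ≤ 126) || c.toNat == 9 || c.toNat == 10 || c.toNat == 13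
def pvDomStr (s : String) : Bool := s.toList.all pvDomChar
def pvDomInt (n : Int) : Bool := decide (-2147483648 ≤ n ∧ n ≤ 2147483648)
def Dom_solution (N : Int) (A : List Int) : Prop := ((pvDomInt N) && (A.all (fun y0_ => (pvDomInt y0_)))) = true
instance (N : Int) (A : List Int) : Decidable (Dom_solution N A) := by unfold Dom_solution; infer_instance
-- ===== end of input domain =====

-- B replaces A's lazy last_max deferral + final max-sweep with an eager version that rebuilds
-- the whole counter list at each max-all operation and returns counters with no final pass (simpler).

-- ===== PORT A =====
-- lazy: state (counters, current_max, last_max); final sweep over range(N)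
def solutionStepA (N : Int) (s : List Int × Int × Int) (a : Int) : List Int × Int × Int :=
  let (c, cur, last) := s
  if a ≠ N + 1 then
    let c1 := PySem.List.pySetD c (a - 1) (max (PySem.List.pyGetD c (a - 1) 0) last)
    let v := PySem.List.pyGetD c1 (a - 1) 0 + 1
    let c2 := PySem.List.pySetD c1 (a - 1) v
    (c2, max cur v, last)
  else
    (c, cur, cur)

def solution (N : Int) (A : List Int) : List Int :=
  let s := A.foldl (solutionStepA N) (List.replicate N.toNat 0, 0, 0)
  (PySem.List.pyRange 0 N 1).foldl
    (fun c i => PySem.List.pySetD c i (max (PySem.List.pyGetD c i 0) s.2.2)) s.1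

-- ===== PORT B =====
-- eager: state (counters, current_max); a max-all rebuilds the entire list; no final sweep
def solutionStepB (N : Int) (s : List Int × Int) (a : Int) : List Int × Int :=
  let (c, cur) := s
  if a ≠ N + 1 then
    let v := PySem.List.pyGetD c (a - 1) 0 + 1
    let c1 := PySem.List.pySetD c (a - 1) v
    (c1, if v > cur then v else cur)
  else
    (List.replicate N.toNat cur, cur)

def solution_alt (N : Int) (A : List Int) : List Int :=
  (A.foldl (solutionStepB N) (List.replicate N.toNat 0, 0)).1

-- ===== PRECONDITION & SPEC =====
-- Pre_ excludes exactly the inputs on which the Python A raises IndexError: an element a ≠ N+1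
-- whose index a-1 is not a valid Python index into a list of length max(N,0).
def Pre_solution (N : Int) (A : List Int) : Prop :=
  ∀ a ∈ A, a = N + 1 ∨ (0 < N ∧ 1 - N ≤ a ∧ a ≤ N)
instance (N : Int) (A : List Int) : Decidable (Pre_solution N A) := by unfold Pre_solution; infer_instance
def pvWitness_solution : Int × List Int := (3, [1, -1, 4, 3, 4, 2])
def Spec_solution (N : Int) (A : List Int) (out : List Int) : Prop := out = solution_alt N A
instance (N : Int) (A : List Int) (out : List Int) : Decidable (Spec_solution N A out) := by unfold Spec_solution; infer_instance

-- ===== CLAIM (what is proved, stated in full; the proofs are below) =====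
def Claim_equal_solution : Prop := ∀ (N : Int) (A : List Int), Dom_solution N A → Pre_solution N A → Spec_solution N A (solution N A)

-- ===== LEMMAS AND PROOFS =====

lemma pyIdx_eq (n : Nat) (i : Int) : PySem.List.pyIdx? n i = if 0 ≤ i then (if i < n then some i.toNat else none) else (if -(n:Int) ≤ i then some (i+n).toNat else none) := by
  unfold PySem.List.pyIdx?
  split_ifs <;> first | rfl | omega | (simp; omega)

lemma pyGetD_resolve (c : List Int) (i : Int) (h1 : -(c.length : Int) ≤ i) (h2 : i < (c.length : Int)) (d : Int) :
    PySem.List.pyGetD c i d = c.getD (if i < 0 then i + c.length else i).toNat d := by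
  rcases lt_or_ge i 0 with hi | hi
  · rw [if_pos hi]
    simp [PySem.List.pyGetD, PySem.List.pyGet?, pyIdx_eq, show ¬ 0 ≤ i by omega, h1, List.getD]
  · rw [if_neg (by omega)]
    simp [PySem.List.pyGetD, PySem.List.pyGet?, pyIdx_eq, hi, h2, List.getD]

lemma pySetD_resolve (c : List Int) (i : Int) (h1 : -(c.length : Int) ≤ i) (h2 : i < (c.length : Int)) (v : Int) :
    PySem.List.pySetD c i v = c.set (if i < 0 then i + c.length else i).toNat v := by
  rcases lt_or_ge i 0 with hi | hi
  · rw [if_pos hi]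
    simp [PySem.List.pySetD, PySem.List.pySet?, pyIdx_eq, show ¬ 0 ≤ i by omega, h1]
  · rw [if_neg (by omega)]
    simp [PySem.List.pySetD, PySem.List.pySet?, pyIdx_eq, hi, h2]

lemma loop_inv (N : Int) (A : List Int) (hA : ∀ a ∈ A, a = N + 1 ∨ (0 < N ∧ 1 - N ≤ a ∧ a ≤ N)) :
    ∀ (c : List Int) (cur last : Int), c.length = N.toNat → last ≤ cur → (∀ x ∈ c, x ≤ cur) →
      (A.foldl (solutionStepB N) (c.map (fun x => max x last), cur)).1
          = (A.foldl (solutionStepA N) (c, cur, last)).1.map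
              (fun x => max x (A.foldl (solutionStepA N) (c, cur, last)).2.2) ∧
        (A.foldl (solutionStepA N) (c, cur, last)).1.length = N.toNat := by
  induction A with
  | nil => intro c cur last hlen hle helem; exact ⟨rfl, hlen⟩
  | cons a t ih =>
    intro c cur last hlen hle helem
    simp only [List.foldl_cons]
    rcases hA a (by simp) with ha | ⟨hN, ha1, ha2⟩
    · -- max-all branch
      have hsA : solutionStepA N (c, cur, last) a = (c, cur, cur) := by
        simp [solutionStepA, ha]
      have hsB : solutionStepB N (c.map (fun x => max x last), cur) a = (List.replicate N.toNat cur, cur) := by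
        simp [solutionStepB, ha]
      rw [hsA, hsB]
      have hrep : c.map (fun x => max x cur) = List.replicate N.toNat cur := by
        rw [List.eq_replicate_iff]
        refine ⟨by simp [hlen], ?_⟩
        intro b hb
        obtain ⟨x, hx, hbx⟩ := List.mem_map.1 hb
        have := helem x hx
        omega
      rw [← hrep]
      exact ih (fun x hx => hA x (by simp [hx])) c cur cur hlen le_rfl helem
    · -- increment branch
      have hne : a ≠ N + 1 := by omega
      have hlen' : (c.length : Int) = N := by omega
      set j : Nat := (if a - 1 < 0 then a - 1 + c.length else a - 1).toNat with hj
      have hjlt : j < c.length := by simp only [hj]; split_ifs <;> omega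
      have getj : ∀ d : List Int, d.length = c.length → ∀ x : Int,
          PySem.List.pyGetD d (a - 1) x = d.getD j x := by
        intro d hd x
        rw [pyGetD_resolve d _ (by omega) (by omega), hd, hj]
      have setj : ∀ d : List Int, d.length = c.length → ∀ v : Int,
          PySem.List.pySetD d (a - 1) v = d.set j v := by
        intro d hd v
        rw [pySetD_resolve d _ (by omega) (by omega), hd, hj]
      set v : Int := max (c.getD j 0) last + 1 with hv
      have hgv : (c.set j (max (c.getD j 0) last)).getD j 0 = max (c.getD j 0) last := by
        rw [List.getD_eq_getElem _ _ (by simpa using hjlt)]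
        exact List.getElem_set_self _
      -- A step
      have hsA : solutionStepA N (c, cur, last) a = (c.set j v, max cur v, last) := by
        simp only [solutionStepA, if_pos hne]
        rw [getj c rfl, setj c rfl, getj _ (by simp), setj _ (by simp), hgv, List.set_set, ← hv]
      -- B step
      have hsB : solutionStepB N (c.map (fun x => max x last), cur) a
          = ((c.set j v).map (fun x => max x last), max cur v) := by
        simp only [solutionStepB, if_pos hne]
        rw [getj _ (by simp), setj _ (by simp)]
        have hg2 : (c.map (fun x => max x last)).getD j 0 = max (c.getD j 0) last := by
          rw [List.getD_eq_getElem _ _ (by simpa using hjlt), List.getElem_map,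
            List.getD_eq_getElem _ _ hjlt]
        rw [hg2]
        have heq : (c.map (fun x => max x last)).set j v = (c.set j v).map (fun x => max x last) := by
          apply List.ext_getElem
          · simp
          · intro n h1 h2
            by_cases hn : n = j
            · subst hn
              rw [List.getElem_set_self (by simpa using hjlt),
                List.getElem_map, List.getElem_set_self (by simpa using hjlt)]
              rw [List.getD_eq_getElem _ _ hjlt] at hv
              omega
            · rw [List.getElem_set_ne (by omega), List.getElem_map, List.getElem_map,
                List.getElem_set_ne (by omega)]
        rw [heq]
        have : max cur v = if v > cur then v else cur := by split_ifs <;> omega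
        rw [this]
      rw [hsA, hsB]
      exact ih (fun x hx => hA x (by simp [hx])) (c.set j v) (max cur v) last
        (by simp [hlen])
        (by omega)
        (by intro x hx
            rcases List.mem_or_eq_of_mem_set hx with h | h
            · have := helem x h; omega
            · subst h; omega)

lemma sweep_aux (last : Int) (suf pre : List Int) :
    (PySem.List.pyRange (pre.length : Int) ((pre.length : Int) + suf.length) 1).foldl
      (fun c2 i => PySem.List.pySetD c2 i (max (PySem.List.pyGetD c2 i 0) last)) (pre ++ suf)
      = pre ++ suf.map (fun x => max x last) := by
  induction suf generalizing pre with
  | nil => simp [PySem.List.pyRange]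
  | cons x t ih =>
    rw [PySem.List.pyRange_one_cons (by simp)]
    simp only [List.foldl_cons, PySem.List.pySetD_natCast, PySem.List.pyGetD_natCast]
    have h1 : (pre ++ x :: t).getD pre.length 0 = x := by simp
    have h2 : (pre ++ x :: t).set pre.length (max x last) = (pre ++ [max x last]) ++ t := by simp
    rw [h1, h2]
    have h3 : ((pre.length : Int) + 1) = ((pre ++ [max x last]).length : Int) := by simp
    have h4 : ((pre.length : Int) + (x :: t).length) = ((pre ++ [max x last]).length : Int) + t.length := by
      simp; omega
    rw [h3, h4, ih]
    simp

lemma sweep_eq (c : List Int) (N last : Int) (hlen : c.length = N.toNat) :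
    (PySem.List.pyRange 0 N 1).foldl
      (fun c2 i => PySem.List.pySetD c2 i (max (PySem.List.pyGetD c2 i 0) last)) c
      = c.map (fun x => max x last) := by
  by_cases hN : N ≤ 0
  · have hc : c = [] := by
      have : c.length = 0 := by omega
      exact List.eq_nil_of_length_eq_zero this
    subst hc
    have hr : PySem.List.pyRange 0 N 1 = [] := by
      unfold PySem.List.pyRange
      split_ifs <;> simp_all
    rw [hr]; rfl
  · have hN2 : 0 < N := by omega
    have hNc : N = (c.length : Int) := by omega
    subst hNc
    simpa using sweep_aux last c []

-- ===== VERDICT (by name: the statement is the Claim_ definition above) =====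
theorem solution_spec : Claim_equal_solution := by
  unfold Claim_equal_solution
  intro N A _ hpre
  unfold Spec_solution solution solution_alt
  obtain ⟨h1, h2⟩ := loop_inv N A hpre (List.replicate N.toNat 0) 0 0 (by simp) le_rfl
    (by intro x hx; rw [List.eq_of_mem_replicate hx])
  have hinit : (List.replicate N.toNat (0 : Int)).map (fun x => max x 0) = List.replicate N.toNat 0 := by
    simp
  rw [hinit] at h1
  rw [sweep_eq _ N _ h2, ← h1]
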